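-- pv_equiv track=rewrite | github.com/mmistroni/Codility | src/toptal_online.py | countMissingTag
-- ===== SOURCE A (Python) =====
-- start_tag = "<app>"
--
-- end_tag = "</app>"
--
-- def countMissingTag(input_str, stack, missing):
--     if not input_str:
--         return len(stack)
--     if input_str.find(start_tag) == 0:
--         new_idx = input_str.find("<app>") + 4
--         stack.append(start_tag)
--         substr = input_str[new_idx+1:]
--         return countMissingTag(substr, stack, missing)
--     else:
--         if stack and stack[-1] == start_tag:
--             stack.pop()
--         else:
--             stack.append(end_tag)
--         idx = input_str.find("</app>") + 5
--         substr = input_str[idx + 1:]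
--         return countMissingTag(substr, stack, missing)
-- ===== SOURCE B (Python) =====
-- # Single left-to-right pass with an index pointer and find(tag, pos): no re-slicing
-- # (O(n) instead of A's O(n^2)); mutates `stack` in place exactly as A does.
-- start_tag = "<app>"
--
-- end_tag = "</app>"
--
-- def countMissingTag(input_str, stack, missing):
--     pos, n = 0, len(input_str)
--     while pos < n:
--         if input_str.startswith(start_tag, pos):
--             stack.append(start_tag)
--             pos += 5
--         else:
--             if stack and stack[-1] == start_tag:
--                 stack.pop()
--             else:
--                 stack.append(end_tag)
--             j = input_str.find(end_tag, pos)
--             pos = j + 6 if j != -1 else pos + 5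
--     return len(stack)
-- ===== Notes on version B (the rewrite author's own statement) =====
-- stated objective: faster
-- what changed: Replaced A's recursion that re-slices the remaining string at every step with a single iterative left-to-right pass over the original string using an index pointer, startswith(tag, pos) and find(tag, pos), so no substring copies are made.
import Mathlib
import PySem

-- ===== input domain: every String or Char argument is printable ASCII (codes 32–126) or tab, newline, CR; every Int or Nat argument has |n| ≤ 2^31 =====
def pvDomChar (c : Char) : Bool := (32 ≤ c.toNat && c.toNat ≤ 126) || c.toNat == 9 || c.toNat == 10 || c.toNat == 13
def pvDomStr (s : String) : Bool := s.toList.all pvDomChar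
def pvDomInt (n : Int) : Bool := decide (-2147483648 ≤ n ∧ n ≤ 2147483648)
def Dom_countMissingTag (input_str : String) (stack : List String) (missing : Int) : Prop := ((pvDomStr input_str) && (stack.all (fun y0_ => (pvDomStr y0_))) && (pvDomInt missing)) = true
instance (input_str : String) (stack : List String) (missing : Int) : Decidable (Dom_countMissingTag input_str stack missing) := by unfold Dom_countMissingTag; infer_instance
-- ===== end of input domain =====

-- B replaces A's "re-slice the string at every recursive step" with a single pass driven by
-- an index pointer and find(tag, pos) — objective: faster (no repeated slicing).
-- Both A and B mutate `stack` in place in the same way; the theorems are about the return value.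

-- the module-level constants start_tag = "<app>", end_tag = "</app>" (as lists of code points)
def pvStartTag : List Char := "<app>".toList
def pvEndTag : List Char := "</app>".toList

-- termination helper for port A: slicing from a positive start index shortens the list
lemma pv_slice_len_lt (s : List Char) (a : Int) (hs : s ≠ []) (ha : 1 ≤ a) :
    (PySem.List.slice s (some a) none).length < s.length := by
  rw [PySem.List.slice_from s (by omega : (0:Int) ≤ a)]
  have hl : 0 < s.length := List.length_pos_iff.mpr hs
  have h1 : 1 ≤ a.toNat := by omega
  simp only [List.length_drop]
  omega

-- ===== PORT A =====
-- A's recursion, on List Char (slices via PySem.List.slice; `stack and stack[-1] == start_tag`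
-- is `stack.getLast? = some "<app>"`, `stack.pop()` is dropLast, `stack.append(t)` is ++ [t]).
def countMissingTagAux (s : List Char) (stack : List String) (missing : Int) : Int :=
  if _h0 : s = [] then (stack.length : Int)
  else if h1 : PySem.Chars.find s pvStartTag = 0 then
    -- new_idx = find("<app>") + 4; substr = input_str[new_idx+1:]
    countMissingTagAux (PySem.List.slice s (some (PySem.Chars.find s pvStartTag + 4 + 1)) none)
      (stack ++ ["<app>"]) missing
  else
    -- idx = find("</app>") + 5; substr = input_str[idx+1:]
    countMissingTagAux (PySem.List.slice s (some (PySem.Chars.find s pvEndTag + 5 + 1)) none)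
      (if stack.getLast? = some "<app>" then stack.dropLast else stack ++ ["</app>"]) missing
termination_by s.length
decreasing_by
  · exact pv_slice_len_lt s _ _h0 (by rw [h1]; norm_num)
  · exact pv_slice_len_lt s _ _h0
      (by have := PySem.Chars.neg_one_le_find s pvEndTag; omega)

def countMissingTag (input_str : String) (stack : List String) (missing : Int) : Int :=
  countMissingTagAux input_str.toList stack missing

-- ===== PORT B =====
-- B's while-loop with the index pointer `pos`; `input_str.startswith(start_tag, pos)` with
-- 0 ≤ pos is exactly `startswith (s.drop pos) tag`; `input_str.find(end_tag, pos)` is findFrom.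
def countMissingTagAltGo (s : List Char) (pos : Nat) (stack : List String) : Int :=
  if h : pos < s.length then
    if PySem.Chars.startswith (s.drop pos) pvStartTag then
      countMissingTagAltGo s (pos + 5) (stack ++ ["<app>"])
    else
      -- j = input_str.find(end_tag, pos); pos = j + 6 if j != -1 else pos + 5
      if hj : PySem.Chars.findFrom s pvEndTag (pos : Int) none ≠ -1 then
        countMissingTagAltGo s ((PySem.Chars.findFrom s pvEndTag (pos : Int) none).toNat + 6)
          (if stack.getLast? = some "<app>" then stack.dropLast else stack ++ ["</app>"])
      else
        countMissingTagAltGo s (pos + 5)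
          (if stack.getLast? = some "<app>" then stack.dropLast else stack ++ ["</app>"])
  else (stack.length : Int)
termination_by s.length - pos
decreasing_by
  · omega
  · have heq := PySem.Chars.findFrom_natCast s pvEndTag pos (le_of_lt h)
    have h0 := PySem.Chars.neg_one_le_find (List.drop pos s) pvEndTag
    rw [heq] at hj ⊢
    by_cases hf : PySem.Chars.find (List.drop pos s) pvEndTag = -1
    · rw [if_pos hf] at hj; exact absurd rfl hj
    · rw [if_neg hf] at hj ⊢; omega
  · omega

def countMissingTag_alt (input_str : String) (stack : List String) (missing : Int) : Int :=
  countMissingTagAltGo input_str.toList 0 stack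

-- ===== PRECONDITION & SPEC =====
def Spec_countMissingTag (input_str : String) (stack : List String) (missing : Int) (out : Int) : Prop := out = countMissingTag_alt input_str stack missing
instance (input_str : String) (stack : List String) (missing : Int) (out : Int) : Decidable (Spec_countMissingTag input_str stack missing out) := by unfold Spec_countMissingTag; infer_instance

-- ===== CLAIM (what is proved, stated in full; the proofs are below) =====
def Claim_equal_countMissingTag : Prop := ∀ (input_str : String) (stack : List String) (missing : Int), Dom_countMissingTag input_str stack missing → Spec_countMissingTag input_str stack missing (countMissingTag input_str stack missing)

-- ===== LEMMAS AND PROOFS =====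

-- `s.find(sub) == 0` is `s.startswith(sub)`
lemma pv_find_zero_iff_startswith (s sub : List Char) :
    PySem.Chars.find s sub = 0 ↔ PySem.Chars.startswith s sub = true := by
  rw [PySem.Chars.startswith_iff]
  constructor
  · intro h
    have hs := PySem.Chars.find_spec (s := s) (sub := sub) (by omega)
    rw [h] at hs
    simpa using hs.1
  · intro hpre
    have hne : PySem.Chars.find s sub ≠ -1 :=
      (PySem.Chars.find_ne_neg_one_iff s sub).mpr hpre.isInfix
    have h0 : 0 ≤ PySem.Chars.find s sub := by
      have := PySem.Chars.neg_one_le_find s sub; omega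
    rcases PySem.Chars.find_spec h0 with ⟨_, hmin⟩
    by_contra hne0
    exact hmin 0 (by omega) (by simpa using hpre)

-- main invariant: A run on the remaining suffix equals B's pointer loop
lemma pv_main (s : List Char) (missing : Int) :
    ∀ (k pos : Nat) (stack : List String), s.length - pos ≤ k →
      countMissingTagAux (s.drop pos) stack missing = countMissingTagAltGo s pos stack := by
  intro k
  induction k with
  | zero =>
    intro pos stack hk
    have hge : s.length ≤ pos := by omega
    rw [countMissingTagAux, countMissingTagAltGo]
    simp [List.drop_eq_nil_iff.mpr hge, Nat.not_lt.mpr hge]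
  | succ k ih =>
    intro pos stack hk
    by_cases hp : pos < s.length
    · have hne : s.drop pos ≠ [] := by
        simp only [ne_eq, List.drop_eq_nil_iff]; omega
      rw [countMissingTagAux, countMissingTagAltGo]
      rw [dif_neg hne, dif_pos hp]
      by_cases hst : PySem.Chars.startswith (s.drop pos) pvStartTag = true
      · have hf0 : PySem.Chars.find (s.drop pos) pvStartTag = 0 :=
          (pv_find_zero_iff_startswith _ _).mpr hst
        rw [if_pos hst, dif_pos hf0, hf0]
        have hsl : PySem.List.slice (s.drop pos) (some ((0 : Int) + 4 + 1)) none
            = s.drop (pos + 5) := by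
          rw [show ((0 : Int) + 4 + 1) = ((5 : Nat) : Int) by norm_num,
              PySem.List.slice_from_natCast, List.drop_drop]
        rw [hsl]
        exact ih (pos + 5) (stack ++ ["<app>"]) (by omega)
      · have hf0 : ¬ PySem.Chars.find (s.drop pos) pvStartTag = 0 := by
          rw [pv_find_zero_iff_startswith]; exact hst
        rw [if_neg hst, dif_neg hf0]
        rw [PySem.Chars.findFrom_natCast s pvEndTag pos (le_of_lt hp)]
        by_cases hf : PySem.Chars.find (s.drop pos) pvEndTag = -1
        · have hsl : PySem.List.slice (s.drop pos)
              (some (PySem.Chars.find (s.drop pos) pvEndTag + 5 + 1)) none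
              = s.drop (pos + 5) := by
            rw [hf, show ((-1 : Int) + 5 + 1) = ((5 : Nat) : Int) by norm_num,
                PySem.List.slice_from_natCast, List.drop_drop]
          rw [hsl, if_pos hf, dif_neg (by simp)]
          exact ih (pos + 5) _ (by omega)
        · have h0 : 0 ≤ PySem.Chars.find (s.drop pos) pvEndTag := by
            have := PySem.Chars.neg_one_le_find (s.drop pos) pvEndTag; omega
          set f := PySem.Chars.find (s.drop pos) pvEndTag with hfdef
          have hsl : PySem.List.slice (s.drop pos) (some (f + 5 + 1)) none
              = s.drop (pos + (f + 6).toNat) := by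
            rw [show (f + 5 + 1) = (((f + 6).toNat : Nat) : Int) by omega,
                PySem.List.slice_from_natCast, List.drop_drop]
          rw [hsl, if_neg hf, dif_pos (by omega : ¬ (pos : Int) + f = -1)]
          have hcast : ((pos : Int) + f).toNat + 6 = pos + (f + 6).toNat := by omega
          rw [hcast]
          exact ih (pos + (f + 6).toNat) _ (by omega)
    · have hge : s.length ≤ pos := by omega
      rw [countMissingTagAux, countMissingTagAltGo]
      simp [List.drop_eq_nil_iff.mpr hge, Nat.not_lt.mpr hge]

-- ===== VERDICT (by name: the statement is the Claim_ definition above) =====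
theorem countMissingTag_spec : Claim_equal_countMissingTag := by
  intro input_str stack missing _
  unfold Spec_countMissingTag countMissingTag countMissingTag_alt
  have := pv_main input_str.toList missing input_str.toList.length 0 stack (by omega)
  simpa using this
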